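-- pv_equiv track=rewrite | github.com/KiranKK1111/genai-dashboard-be | app/services/knowledge_graph.py | _classify_entity_type
-- ===== SOURCE A (Python) =====
-- from typing import Dict, List, Set, Tuple, Optional, Any
-- from enum import Enum
--
-- class EntityType(str, Enum):
--     """Semantic types of entities - generic types applicable to any domain."""
--     PERSON = "person"               # People-related entities
--     ORGANIZATION = "organization"   # Business entities
--     TRANSACTION = "transaction"     # Action/event records
--     PRODUCT = "product"             # Items, services
--     LOCATION = "location"           # Geographic entities
--     TIME = "time"                   # Time-related entities
--     DOCUMENT = "document"           # Document records
--     CATEGORY = "category"           # Classification entities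
--     METRIC = "metric"               # Measurement entities
--     ENTITY = "entity"               # Generic entity
--
-- def _classify_entity_type(table_name: str, columns: List) -> EntityType:
--     """Classify table as semantic entity type using generic heuristics.
--
--     NO HARDCODED KEYWORDS - uses column pattern analysis instead.
--     """
--     table_lower = table_name.lower()
--     col_names = [c['name'].lower() for c in columns]
--
--     # Generic pattern-based classification (no hardcoded domain keywords)
--     # Check for person-related patterns: has name, email, phone columns
--     person_patterns = ['name', 'email', 'phone', 'address', 'birth', 'age']
--     if sum(1 for p in person_patterns if any(p in c for c in col_names)) >= 2:
--         return EntityType.PERSON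
--
--     # Check for transaction patterns: has amount, date, status columns
--     transaction_patterns = ['amount', 'total', 'price', 'date', 'time', 'status']
--     if sum(1 for p in transaction_patterns if any(p in c for c in col_names)) >= 2:
--         return EntityType.TRANSACTION
--
--     # Check for product patterns: has price, quantity, sku columns
--     product_patterns = ['price', 'quantity', 'sku', 'stock', 'inventory']
--     if sum(1 for p in product_patterns if any(p in c for c in col_names)) >= 2:
--         return EntityType.PRODUCT
--
--     # Check for location patterns: has lat/lon, city, country columns
--     location_patterns = ['lat', 'lon', 'city', 'state', 'country', 'zip', 'postal']
--     if sum(1 for p in location_patterns if any(p in c for c in col_names)) >= 2: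
--         return EntityType.LOCATION
--
--     # Check for organization patterns: has company-related columns
--     org_patterns = ['company', 'org', 'business', 'corp', 'inc']
--     if any(p in table_lower for p in org_patterns) or sum(1 for p in org_patterns if any(p in c for c in col_names)) >= 1:
--         return EntityType.ORGANIZATION
--
--     # Check for category/lookup patterns: small number of columns, has name/code
--     if len(col_names) <= 5 and any('name' in c or 'code' in c or 'type' in c for c in col_names):
--         return EntityType.CATEGORY
--
--     return EntityType.ENTITY
-- ===== SOURCE B (Python) =====
-- # B: single pass over the columns, collecting per-group sets of matched patterns
-- # (a pattern matched by several columns counts once, as in A's distinct-pattern count).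
-- PERSON_P = ('name', 'email', 'phone', 'address', 'birth', 'age')
-- TRANS_P = ('amount', 'total', 'price', 'date', 'time', 'status')
-- PROD_P = ('price', 'quantity', 'sku', 'stock', 'inventory')
-- LOC_P = ('lat', 'lon', 'city', 'state', 'country', 'zip', 'postal')
-- ORG_P = ('company', 'org', 'business', 'corp', 'inc')
--
--
-- def _classify_entity_type(table_name, columns):
--     person, trans, prod, loc, org = set(), set(), set(), set(), set()
--     n = 0
--     has_name_code_type = False
--     for col in columns:
--         c = col['name'].lower()
--         person.update(p for p in PERSON_P if p in c)
--         trans.update(p for p in TRANS_P if p in c)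
--         prod.update(p for p in PROD_P if p in c)
--         loc.update(p for p in LOC_P if p in c)
--         org.update(p for p in ORG_P if p in c)
--         n += 1
--         has_name_code_type = has_name_code_type or 'name' in c or 'code' in c or 'type' in c
--     if len(person) >= 2:
--         return "person"
--     if len(trans) >= 2:
--         return "transaction"
--     if len(prod) >= 2:
--         return "product"
--     if len(loc) >= 2:
--         return "location"
--     tl = table_name.lower()
--     if any(p in tl for p in ORG_P) or len(org) >= 1:
--         return "organization"
--     if n <= 5 and has_name_code_type:
--         return "category"
--     return "entity"
-- ===== Notes on version B (the rewrite author's own statement) =====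
-- stated objective: alternative
-- what changed: B replaces A's five per-pattern scans (each pattern re-scanning all column names via any(...)) with a single pass over the columns that accumulates per-group sets of matched patterns plus the column count and a name/code/type flag, then evaluates the same conditions on the set sizes.
import Mathlib
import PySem

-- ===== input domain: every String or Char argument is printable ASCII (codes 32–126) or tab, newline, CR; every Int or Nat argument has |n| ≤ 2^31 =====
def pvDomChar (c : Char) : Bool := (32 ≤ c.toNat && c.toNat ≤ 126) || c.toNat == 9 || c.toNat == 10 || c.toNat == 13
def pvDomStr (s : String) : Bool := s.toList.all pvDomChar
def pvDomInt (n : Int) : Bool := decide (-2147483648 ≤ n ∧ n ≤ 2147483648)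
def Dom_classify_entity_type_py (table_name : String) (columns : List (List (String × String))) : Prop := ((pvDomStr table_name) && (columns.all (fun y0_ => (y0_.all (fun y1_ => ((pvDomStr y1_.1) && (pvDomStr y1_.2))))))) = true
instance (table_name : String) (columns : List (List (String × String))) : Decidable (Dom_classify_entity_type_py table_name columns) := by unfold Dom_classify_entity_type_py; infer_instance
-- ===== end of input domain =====

-- B makes ONE pass over the columns collecting per-group sets of matched patterns
-- (instead of A's per-pattern scans over all columns); objective: alternative decomposition,
-- same result. Equivalence is about the return value; neither side mutates its arguments.

-- ===== PORT A =====
-- sum(1 for p in pats if any(p in c for c in col_names))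
def pvScoreA (pats : List String) (cols : List String) : Nat :=
  (pats.filter (fun p => cols.any (fun c => PySem.Str.isIn p c))).length

def classify_entity_type_py (table_name : String) (columns : List (List (String × String))) : String :=
  let table_lower := PySem.Str.lower table_name
  -- c['name'] : KeyError (excluded by Pre_) ported as getD ""
  let col_names := columns.map (fun c => PySem.Str.lower (((PySem.Dict.mk c).get? "name").getD ""))
  if 2 ≤ pvScoreA ["name", "email", "phone", "address", "birth", "age"] col_names then "person"
  else if 2 ≤ pvScoreA ["amount", "total", "price", "date", "time", "status"] col_names then "transaction"
  else if 2 ≤ pvScoreA ["price", "quantity", "sku", "stock", "inventory"] col_names then "product"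
  else if 2 ≤ pvScoreA ["lat", "lon", "city", "state", "country", "zip", "postal"] col_names then "location"
  else if (["company", "org", "business", "corp", "inc"].any (fun p => PySem.Str.isIn p table_lower))
          || decide (1 ≤ pvScoreA ["company", "org", "business", "corp", "inc"] col_names) then "organization"
  else if decide (col_names.length ≤ 5)
          && col_names.any (fun c => PySem.Str.isIn "name" c || PySem.Str.isIn "code" c || PySem.Str.isIn "type" c) then "category"
  else "entity"

-- ===== PORT B =====
def pvPERSON : List String := ["name", "email", "phone", "address", "birth", "age"]
def pvTRANS : List String := ["amount", "total", "price", "date", "time", "status"]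
def pvPROD : List String := ["price", "quantity", "sku", "stock", "inventory"]
def pvLOC : List String := ["lat", "lon", "city", "state", "country", "zip", "postal"]
def pvORG : List String := ["company", "org", "business", "corp", "inc"]

-- s.update(p for p in pats if p in c)
def pvAddMatches (pats : List String) (s : PySem.Set String) (c : String) : PySem.Set String :=
  PySem.Set.update s (pats.filter (fun p => PySem.Str.isIn p c))

def classify_entity_type_py_alt (table_name : String) (columns : List (List (String × String))) : String :=
  let st := columns.foldl
    (fun st col =>
      let c := PySem.Str.lower (((PySem.Dict.mk col).get? "name").getD "")
      (pvAddMatches pvPERSON st.1 c, pvAddMatches pvTRANS st.2.1 c,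
       pvAddMatches pvPROD st.2.2.1 c, pvAddMatches pvLOC st.2.2.2.1 c,
       pvAddMatches pvORG st.2.2.2.2.1 c, st.2.2.2.2.2.1 + 1,
       st.2.2.2.2.2.2 || PySem.Str.isIn "name" c || PySem.Str.isIn "code" c || PySem.Str.isIn "type" c))
    ((PySem.Set.empty : PySem.Set String), (PySem.Set.empty : PySem.Set String),
     (PySem.Set.empty : PySem.Set String), (PySem.Set.empty : PySem.Set String),
     (PySem.Set.empty : PySem.Set String), (0 : Nat), false)
  if 2 ≤ PySem.Set.len st.1 then "person"
  else if 2 ≤ PySem.Set.len st.2.1 then "transaction"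
  else if 2 ≤ PySem.Set.len st.2.2.1 then "product"
  else if 2 ≤ PySem.Set.len st.2.2.2.1 then "location"
  else if (pvORG.any (fun p => PySem.Str.isIn p (PySem.Str.lower table_name)))
          || decide (1 ≤ PySem.Set.len st.2.2.2.2.1) then "organization"
  else if decide (st.2.2.2.2.2.1 ≤ 5) && st.2.2.2.2.2.2 then "category"
  else "entity"

-- ===== PRECONDITION & SPEC =====
-- Pre_ excludes exactly the columns without a 'name' key, on which A raises KeyError.
def Pre_classify_entity_type_py (table_name : String) (columns : List (List (String × String))) : Prop :=
  ∀ c ∈ columns, ((PySem.Dict.mk c).get? "name").isSome = true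
instance (table_name : String) (columns : List (List (String × String))) : Decidable (Pre_classify_entity_type_py table_name columns) := by unfold Pre_classify_entity_type_py; infer_instance

def pvWitness_classify_entity_type_py : String × (List (List (String × String))) :=
  ("users", [[("name", "full_name"), ("type", "text")], [("name", "email")]])

def Spec_classify_entity_type_py (table_name : String) (columns : List (List (String × String))) (out : String) : Prop := out = classify_entity_type_py_alt table_name columns
instance (table_name : String) (columns : List (List (String × String))) (out : String) : Decidable (Spec_classify_entity_type_py table_name columns out) := by unfold Spec_classify_entity_type_py; infer_instance

-- ===== CLAIM (what is proved, stated in full; the proofs are below) =====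
def Claim_equal_classify_entity_type_py : Prop := ∀ (table_name : String) (columns : List (List (String × String))), Dom_classify_entity_type_py table_name columns → Pre_classify_entity_type_py table_name columns → Spec_classify_entity_type_py table_name columns (classify_entity_type_py table_name columns)

-- ===== LEMMAS AND PROOFS =====

theorem pv_fold_nodup (pats : List String) (cols : List String) (s : PySem.Set String)
    (hs : s.Nodup) : (cols.foldl (pvAddMatches pats) s).Nodup := by
  induction cols generalizing s with
  | nil => exact hs
  | cons c cs ih => exact ih _ (PySem.Set.nodup_update _ _ hs)

theorem pv_fold_mem (pats : List String) (cols : List String) (s : PySem.Set String) (x : String) :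
    x ∈ cols.foldl (pvAddMatches pats) s ↔
      x ∈ s ∨ (x ∈ pats ∧ ∃ c ∈ cols, PySem.Str.isIn x c = true) := by
  induction cols generalizing s with
  | nil => simp
  | cons c cs ih =>
    simp only [List.foldl_cons, ih, pvAddMatches, PySem.Set.mem_update, List.mem_filter,
      List.mem_cons]
    constructor
    · rintro ((h | ⟨hp, hc⟩) | ⟨hp, c', hc', h⟩)
      · exact Or.inl h
      · exact Or.inr ⟨hp, c, Or.inl rfl, hc⟩
      · exact Or.inr ⟨hp, c', Or.inr hc', h⟩
    · rintro (h | ⟨hp, c', (rfl | hc'), h⟩)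
      · exact Or.inl (Or.inl h)
      · exact Or.inl (Or.inr ⟨hp, h⟩)
      · exact Or.inr ⟨hp, c', hc', h⟩

theorem pv_fold_len (pats : List String) (cols : List String) (hp : pats.Nodup) :
    PySem.Set.len (cols.foldl (pvAddMatches pats) PySem.Set.empty) = (pvScoreA pats cols : Int) := by
  have hperm : (cols.foldl (pvAddMatches pats) PySem.Set.empty).Perm
      (pats.filter (fun p => cols.any (fun c => PySem.Str.isIn p c))) := by
    rw [List.perm_ext_iff_of_nodup (pv_fold_nodup pats cols PySem.Set.empty (by simp [PySem.Set.empty])) (hp.filter _)]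
    intro a
    simp only [pv_fold_mem, List.mem_filter, List.any_eq_true, PySem.Set.empty]
    simp
  simp only [PySem.Set.len, pvScoreA, hperm.length_eq]

theorem pv_len_person (cols : List String) :
    PySem.Set.len (cols.foldl (pvAddMatches pvPERSON) PySem.Set.empty) = (pvScoreA pvPERSON cols : Int) :=
  pv_fold_len _ _ (by decide)
theorem pv_len_trans (cols : List String) :
    PySem.Set.len (cols.foldl (pvAddMatches pvTRANS) PySem.Set.empty) = (pvScoreA pvTRANS cols : Int) :=
  pv_fold_len _ _ (by decide)
theorem pv_len_prod (cols : List String) :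
    PySem.Set.len (cols.foldl (pvAddMatches pvPROD) PySem.Set.empty) = (pvScoreA pvPROD cols : Int) :=
  pv_fold_len _ _ (by decide)
theorem pv_len_loc (cols : List String) :
    PySem.Set.len (cols.foldl (pvAddMatches pvLOC) PySem.Set.empty) = (pvScoreA pvLOC cols : Int) :=
  pv_fold_len _ _ (by decide)
theorem pv_len_org (cols : List String) :
    PySem.Set.len (cols.foldl (pvAddMatches pvORG) PySem.Set.empty) = (pvScoreA pvORG cols : Int) :=
  pv_fold_len _ _ (by decide)

-- the big tuple fold computes the seven independent folds componentwise
theorem pv_fold_split (columns : List (List (String × String)))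
    (st : PySem.Set String × PySem.Set String × PySem.Set String × PySem.Set String ×
          PySem.Set String × Nat × Bool) :
    (columns.foldl
      (fun st col =>
        let c := PySem.Str.lower (((PySem.Dict.mk col).get? "name").getD "")
        (pvAddMatches pvPERSON st.1 c, pvAddMatches pvTRANS st.2.1 c,
         pvAddMatches pvPROD st.2.2.1 c, pvAddMatches pvLOC st.2.2.2.1 c,
         pvAddMatches pvORG st.2.2.2.2.1 c, st.2.2.2.2.2.1 + 1,
         st.2.2.2.2.2.2 || PySem.Str.isIn "name" c || PySem.Str.isIn "code" c || PySem.Str.isIn "type" c))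
      st) =
    (let cols := columns.map (fun c => PySem.Str.lower (((PySem.Dict.mk c).get? "name").getD ""))
     (cols.foldl (pvAddMatches pvPERSON) st.1, cols.foldl (pvAddMatches pvTRANS) st.2.1,
      cols.foldl (pvAddMatches pvPROD) st.2.2.1, cols.foldl (pvAddMatches pvLOC) st.2.2.2.1,
      cols.foldl (pvAddMatches pvORG) st.2.2.2.2.1, st.2.2.2.2.2.1 + columns.length,
      st.2.2.2.2.2.2 || cols.any (fun c => PySem.Str.isIn "name" c || PySem.Str.isIn "code" c || PySem.Str.isIn "type" c))) := by
  induction columns generalizing st with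
  | nil => simp
  | cons col cs ih =>
    simp only [List.foldl_cons, List.map_cons, List.any_cons, ih]
    refine congrArg _ (congrArg _ (congrArg _ (congrArg _ (congrArg _ ?_))))
    simp only [Prod.mk.injEq]
    exact ⟨by simp [List.length_cons]; omega, by simp [Bool.or_assoc]⟩

-- ===== VERDICT (by name: the statement is the Claim_ definition above) =====
theorem classify_entity_type_py_spec : Claim_equal_classify_entity_type_py := by
  intro table_name columns _ _
  show classify_entity_type_py table_name columns = classify_entity_type_py_alt table_name columns
  unfold classify_entity_type_py classify_entity_type_py_alt
  rw [pv_fold_split]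
  simp only [pv_len_person, pv_len_trans, pv_len_prod, pv_len_loc, pv_len_org,
    List.length_map, Nat.zero_add, Bool.false_or, Nat.ofNat_le_cast, Nat.one_le_cast]
  simp only [pvPERSON, pvTRANS, pvPROD, pvLOC, pvORG]
  split_ifs <;> first | rfl | simp_all
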